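-- pv_equiv track=rewrite | github.com/IWNL999/USE | 23/23 2.py | func
-- ===== SOURCE A (Python) =====
-- def func(a, b, r, was12):
--     if a > b or a == 22:
--         return 0
--     elif a == b and was12 == True:
--         return 1
--     else:
--         new_was12 = was12 or (a==12)
--         return (func(a+1, b, r+"1", new_was12) +
--                 func(a*2, b, r+"2", new_was12) +
--                 func(a*3, b, r+"3", new_was12))
-- ===== SOURCE B (Python) =====
-- def func(a, b, r, was12):
--     # Bottom-up DP over x from b down to a; tabF/tabT hold the value of the
--     # state (x, was12=False/True) at index x - a.  r never influences the result.
--     n = b - a + 1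
--     if n <= 0 or a == 22:
--         return 0
--     tabF = [0] * n
--     tabT = [0] * n
--     def get(tab, x):
--         i = x - a
--         return tab[i] if 0 <= i < n else 0
--     for x in range(b, a - 1, -1):
--         if x == 22:
--             continue
--         tabT[x - a] = 1 if x == b else get(tabT, x + 1) + get(tabT, 2 * x) + get(tabT, 3 * x)
--         src = tabT if x == 12 else tabF
--         tabF[x - a] = get(src, x + 1) + get(src, 2 * x) + get(src, 3 * x)
--     return tabT[0] if was12 else tabF[0]
-- ===== Notes on version B (the rewrite author's own statement) =====
-- stated objective: alternative
-- what changed: Replaces the triple-branching recursion by a bottom-up dynamic program over the states (x, was12) for x from b down to a, stored in two flat tables; the string accumulator r, which never influences the result, is dropped.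
-- outside the precondition, e.g. on func(0, 5, '', False): A raises RecursionError, B returns 0
import Mathlib
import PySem

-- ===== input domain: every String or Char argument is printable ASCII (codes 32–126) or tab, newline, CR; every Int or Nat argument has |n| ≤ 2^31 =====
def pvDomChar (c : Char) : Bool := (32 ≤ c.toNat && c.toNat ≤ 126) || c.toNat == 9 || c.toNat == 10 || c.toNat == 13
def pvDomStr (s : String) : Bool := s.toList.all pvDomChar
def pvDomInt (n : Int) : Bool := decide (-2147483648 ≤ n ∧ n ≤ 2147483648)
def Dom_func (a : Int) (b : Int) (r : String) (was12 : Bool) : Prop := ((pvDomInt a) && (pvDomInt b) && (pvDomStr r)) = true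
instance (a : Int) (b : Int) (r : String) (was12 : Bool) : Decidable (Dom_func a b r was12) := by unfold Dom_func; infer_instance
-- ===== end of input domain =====

-- B replaces A's triple-branching recursion by a bottom-up DP over the states
-- (x, was12), x from b down to a (r never influences the result): alternative algorithm.

-- ===== PORT A =====
-- fuel guard only makes the recursion total; inside Pre_func the fuel suffices
-- and the computation is exactly A's.
def funcAux (fuel : Nat) (a : Int) (b : Int) (r : String) (w : Bool) : Int :=
  if a > b ∨ a = 22 then 0
  else if a = b ∧ w = true then 1
  else match fuel with
    | 0 => 0
    | n + 1 =>
      let nw := w || decide (a = 12)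
      funcAux n (a + 1) b (r ++ "1") nw +
      funcAux n (a * 2) b (r ++ "2") nw +
      funcAux n (a * 3) b (r ++ "3") nw

-- for a ≤ 0 Python's recursion never returns except through the two fuel-free
-- base cases, so fuel 0 is enough there (and avoids deep recursion at #eval)
def func (a : Int) (b : Int) (r : String) (was12 : Bool) : Int :=
  funcAux (if 1 ≤ a then (b - a + 1).toNat else 0) a b r was12

-- ===== PORT B =====
-- Source B's helper get(tab, x): the table entry of state x (index x - a), 0 outside
def getTab (a : Int) (n : Int) (tab : Array Int) (x : Int) : Int :=
  if 0 ≤ x - a ∧ x - a < n then tab.getD (x - a).toNat 0 else 0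

-- one iteration of Source B's loop body; state = (tabF, tabT)
def stepB (a : Int) (b : Int) (n : Int) (s : Array Int × Array Int) (x : Int) :
    Array Int × Array Int :=
  if x = 22 then s
  else
    let tabT := s.2.setIfInBounds (x - a).toNat
      (if x = b then 1
       else getTab a n s.2 (x + 1) + getTab a n s.2 (2 * x) + getTab a n s.2 (3 * x))
    let src := if x = 12 then tabT else s.1
    let tabF := s.1.setIfInBounds (x - a).toNat
      (getTab a n src (x + 1) + getTab a n src (2 * x) + getTab a n src (3 * x))
    (tabF, tabT)

def func_alt (a : Int) (b : Int) (r : String) (was12 : Bool) : Int :=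
  let n := b - a + 1
  if n ≤ 0 ∨ a = 22 then 0
  else
    let s := (PySem.List.pyRange b (a - 1) (-1)).foldl (stepB a b n)
      (Array.replicate n.toNat 0, Array.replicate n.toNat 0)
    if was12 then s.2.getD 0 0 else s.1.getD 0 0

-- ===== PRECONDITION & SPEC =====
-- Pre_func excludes exactly the inputs (a ≤ 0 with a ≤ b, except the immediate
-- base case a = b ∧ was12) on which A recurses forever through a*2 and raises
-- RecursionError; A returns normally everywhere inside Pre_func.
def Pre_func (a : Int) (b : Int) (r : String) (was12 : Bool) : Prop :=
  1 ≤ a ∨ b < a ∨ (a = b ∧ was12 = true)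
instance (a : Int) (b : Int) (r : String) (was12 : Bool) : Decidable (Pre_func a b r was12) := by
  unfold Pre_func; infer_instance

def pvWitness_func : Int × Int × String × Bool := (1, 10, "", false)

def Spec_func (a : Int) (b : Int) (r : String) (was12 : Bool) (out : Int) : Prop := out = func_alt a b r was12
instance (a : Int) (b : Int) (r : String) (was12 : Bool) (out : Int) : Decidable (Spec_func a b r was12 out) := by unfold Spec_func; infer_instance

-- ===== CLAIM (what is proved, stated in full; the proofs are below) =====
def Claim_equal_func : Prop := ∀ (a : Int) (b : Int) (r : String) (was12 : Bool), Dom_func a b r was12 → Pre_func a b r was12 → Spec_func a b r was12 (func a b r was12)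

-- ===== LEMMAS AND PROOFS =====

-- A's result depends neither on r nor on the fuel, once the fuel is at least b - a + 1.
theorem funcAux_eq (b : Int) (n : Nat) :
    ∀ (m : Nat) (a : Int) (r r' : String) (w : Bool), 1 ≤ a →
      (b - a + 1).toNat ≤ n → (b - a + 1).toNat ≤ m →
      funcAux n a b r w = funcAux m a b r' w := by
  induction n using Nat.strong_induction_on with
  | _ n ih =>
    intro m a r r' w ha hn hm
    rw [funcAux.eq_def, funcAux.eq_def]
    by_cases h1 : a > b ∨ a = 22
    · simp [h1]
    · by_cases h2 : a = b ∧ w = true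
      · simp [h2]
      · have hab : a ≤ b := by omega
        cases n with
        | zero => omega
        | succ n' =>
          cases m with
          | zero => omega
          | succ m' =>
            simp only [h1, h2, if_false]
            have e1 := ih n' (by omega) m' (a + 1) (r ++ "1") (r' ++ "1")
              (w || decide (a = 12)) (by omega) (by omega) (by omega)
            have e2 := ih n' (by omega) m' (a * 2) (r ++ "2") (r' ++ "2")
              (w || decide (a = 12)) (by omega) (by omega) (by omega)
            have e3 := ih n' (by omega) m' (a * 3) (r ++ "3") (r' ++ "3")
              (w || decide (a = 12)) (by omega) (by omega) (by omega)
            rw [e1, e2, e3]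

-- the canonical value of A's recursion at state (y, w)
def F (b : Int) (y : Int) (w : Bool) : Int := funcAux (b - y + 1).toNat y b "" w

theorem F_of_gt (b y : Int) (w : Bool) (h : b < y) : F b y w = 0 := by
  rw [F, funcAux.eq_def]; simp [h]

theorem F_of_22 (b : Int) (w : Bool) : F b 22 w = 0 := by
  rw [F, funcAux.eq_def]; simp

theorem F_base (b : Int) (hb : b ≠ 22) : F b b true = 1 := by
  rw [F, funcAux.eq_def]
  simp [hb]

theorem F_rec (b y : Int) (w : Bool) (h1 : 1 ≤ y) (h2 : y ≤ b) (h3 : y ≠ 22)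
    (h4 : ¬(y = b ∧ w = true)) :
    F b y w = F b (y + 1) (w || decide (y = 12)) + F b (y * 2) (w || decide (y = 12))
      + F b (y * 3) (w || decide (y = 12)) := by
  have hk : (b - y + 1).toNat = (b - y).toNat + 1 := by omega
  rw [F, hk, funcAux]
  have h1' : ¬(y > b ∨ y = 22) := by omega
  simp only [h1', h4, if_false]
  rw [funcAux_eq b (b - y).toNat _ (y + 1) _ "" _ (by omega) (by omega) (le_refl _),
      funcAux_eq b (b - y).toNat _ (y * 2) _ "" _ (by omega) (by omega) (le_refl _),
      funcAux_eq b (b - y).toNat _ (y * 3) _ "" _ (by omega) (by omega) (le_refl _)]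
  rfl

-- table lookups: unwritten cells, overwritten cell, untouched cells
theorem getD_replicate_zero (m : Nat) (i : Nat) :
    (Array.replicate m (0 : Int)).getD i 0 = 0 := by
  rw [Array.getD_eq_getD_getElem?]
  rcases lt_or_ge i m with h | h
  · simp [h]
  · simp [Nat.not_lt.2 h]

theorem getTab_replicate (a n : Int) (m : Nat) (y : Int) :
    getTab a n (Array.replicate m 0) y = 0 := by
  unfold getTab
  split_ifs with h
  · exact getD_replicate_zero m _
  · rfl

theorem getTab_set_self (a n : Int) (tab : Array Int) (x : Int) (v : Int)
    (hax : a ≤ x) (hxn : x - a < n) (hsize : tab.size = n.toNat) :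
    getTab a n (tab.setIfInBounds (x - a).toNat v) x = v := by
  unfold getTab
  rw [if_pos (by omega), Array.getD_eq_getD_getElem?, Array.getElem?_setIfInBounds]
  simp [show (x - a).toNat < tab.size by omega]

theorem getTab_set_ne (a n : Int) (tab : Array Int) (x : Int) (v : Int) (y : Int)
    (hax : a ≤ x) (hne : y ≠ x) :
    getTab a n (tab.setIfInBounds (x - a).toNat v) y = getTab a n tab y := by
  unfold getTab
  split_ifs with h
  · rw [Array.getD_eq_getD_getElem?, Array.getElem?_setIfInBounds,
        if_neg (by omega : ¬ (x - a).toNat = (y - a).toNat), ← Array.getD_eq_getD_getElem?]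
  · rfl

-- the DP-table invariant: cells above x hold the canonical values, the rest are 0
def DPInv (a b n : Int) (s : Array Int × Array Int) (x : Int) : Prop :=
  s.1.size = n.toNat ∧ s.2.size = n.toNat ∧
  ∀ (y : Int) (w : Bool),
    getTab a n (if w then s.2 else s.1) y = if x < y then F b y w else 0

theorem stepB_inv (a b n x : Int) (s : Array Int × Array Int)
    (hn : n = b - a + 1) (hx1 : 1 ≤ x) (hax : a ≤ x) (hxb : x ≤ b)
    (h : DPInv a b n s x) : DPInv a b n (stepB a b n s x) (x - 1) := by
  obtain ⟨hs1, hs2, hget⟩ := h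
  have hgetT : ∀ (y : Int), x < y → getTab a n s.2 y = F b y true := by
    intro y hy
    have := hget y true
    simpa [hy] using this
  have hgetF : ∀ (y : Int), x < y → getTab a n s.1 y = F b y false := by
    intro y hy
    have := hget y false
    simpa [hy] using this
  have h0T : ∀ (y : Int), y ≤ x → getTab a n s.2 y = 0 := by
    intro y hy
    have := hget y true
    simpa [show ¬ x < y by omega] using this
  have h0F : ∀ (y : Int), y ≤ x → getTab a n s.1 y = 0 := by
    intro y hy
    have := hget y false
    simpa [show ¬ x < y by omega] using this
  by_cases h22 : x = 22
  · refine ⟨by simp [stepB, h22, hs1], by simp [stepB, h22, hs2], ?_⟩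
    intro y w
    rw [stepB, if_pos h22, hget y w]
    rcases lt_trichotomy x y with hxy | hxy | hxy
    · rw [if_pos hxy, if_pos (show x - 1 < y by omega)]
    · rw [if_neg (show ¬ x < y by omega), if_pos (show x - 1 < y by omega)]
      subst hxy h22
      rw [F_of_22]
    · rw [if_neg (show ¬ x < y by omega), if_neg (show ¬ x - 1 < y by omega)]
  · rw [stepB, if_neg h22]
    set vT : Int := if x = b then 1
      else getTab a n s.2 (x + 1) + getTab a n s.2 (2 * x) + getTab a n s.2 (3 * x) with hvT
    set tabT := s.2.setIfInBounds (x - a).toNat vT with htabT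
    have hvT' : vT = F b x true := by
      rw [hvT]
      split_ifs with hxbeq
      · subst hxbeq
        exact (F_base _ h22).symm
      · rw [hgetT (x + 1) (by omega), hgetT (2 * x) (by omega), hgetT (3 * x) (by omega),
            F_rec b x true hx1 hxb h22 (by simp [hxbeq])]
        simp [mul_comm]
    have hsrc : ∀ (y : Int), x < y →
        getTab a n (if x = 12 then tabT else s.1) y = F b y (decide (x = 12)) := by
      intro y hy
      split_ifs with h12
      · rw [htabT, getTab_set_ne a n s.2 x vT y hax (by omega), hgetT y hy]
        simp [h12]
      · rw [hgetF y hy]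
        simp [h12]
    refine ⟨by simp [Array.size_setIfInBounds, hs1],
            by simp [htabT, Array.size_setIfInBounds, hs2], ?_⟩
    intro y w
    rcases lt_trichotomy x y with hxy | hxy | hxy
    · -- untouched cells above x
      rw [if_pos (show x - 1 < y by omega)]
      cases w with
      | true =>
        simp only [if_true]
        rw [htabT, getTab_set_ne a n s.2 x vT y hax (by omega)]
        exact hgetT y hxy
      | false =>
        simp only [Bool.false_eq_true, if_false]
        rw [getTab_set_ne a n s.1 x _ y hax (by omega)]
        exact hgetF y hxy
    · -- the two cells written at x
      subst hxy
      rw [if_pos (show x - 1 < x by omega)]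
      cases w with
      | true =>
        simp only [if_true]
        rw [htabT, getTab_set_self a n s.2 x vT hax (by omega) hs2]
        exact hvT'
      | false =>
        simp only [Bool.false_eq_true, if_false]
        rw [getTab_set_self a n s.1 x _ hax (by omega) hs1,
            hsrc (x + 1) (by omega), hsrc (2 * x) (by omega), hsrc (3 * x) (by omega),
            F_rec b x false hx1 hxb h22 (by simp)]
        simp [mul_comm]
    · -- cells below x stay 0
      rw [if_neg (show ¬ x - 1 < y by omega)]
      cases w with
      | true =>
        simp only [if_true]
        rw [htabT, getTab_set_ne a n s.2 x vT y hax (by omega)]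
        exact h0T y (by omega)
      | false =>
        simp only [Bool.false_eq_true, if_false]
        rw [getTab_set_ne a n s.1 x _ y hax (by omega)]
        exact h0F y (by omega)

theorem loop_inv (a b n : Int) (hn : n = b - a + 1) (ha : 1 ≤ a) :
    ∀ (k : Nat) (t : Int) (s : Array Int × Array Int),
      a - 1 ≤ t → t ≤ b → (t - (a - 1)).toNat = k → DPInv a b n s t →
      DPInv a b n ((PySem.List.pyRange t (a - 1) (-1)).foldl (stepB a b n) s) (a - 1) := by
  intro k
  induction k with
  | zero =>
    intro t s h1 h2 h3 hs
    have ht : t = a - 1 := by omega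
    rw [PySem.List.pyRange_neg_one_eq_nil (by omega)]
    simpa [ht] using hs
  | succ k ih =>
    intro t s h1 h2 h3 hs
    have hlt : a - 1 < t := by omega
    rw [PySem.List.pyRange_neg_one_cons hlt, List.foldl_cons]
    exact ih (t - 1) (stepB a b n s t) (by omega) (by omega) (by omega)
      (stepB_inv a b n t s hn (by omega) (by omega) h2 hs)

theorem dpinv_init (a b n : Int) :
    DPInv a b n (Array.replicate n.toNat 0, Array.replicate n.toNat 0) b := by
  refine ⟨by simp, by simp, ?_⟩
  intro y w
  have : getTab a n (if w then Array.replicate n.toNat (0 : Int)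
      else Array.replicate n.toNat 0) y = 0 := by
    split_ifs <;> exact getTab_replicate a n n.toNat y
  rw [this]
  split_ifs with h
  · rw [F_of_gt b y w h]
  · rfl

-- ===== VERDICT (by name: the statement is the Claim_ definition above) =====
theorem func_spec : Claim_equal_func := by
  intro a b r was12 _ hpre
  unfold Spec_func func func_alt
  by_cases htriv : b - a + 1 ≤ 0 ∨ a = 22
  · rw [if_pos htriv, funcAux.eq_def]
    have : a > b ∨ a = 22 := by omega
    simp [this]
  · rw [if_neg htriv]
    by_cases ha : 1 ≤ a
    · -- main case: run the DP invariant from b down to a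
      rw [if_pos ha]
      have hfin := loop_inv a b (b - a + 1) rfl ha (b - (a - 1)).toNat b
        (Array.replicate (b - a + 1).toNat 0, Array.replicate (b - a + 1).toNat 0)
        (by omega) (by omega) rfl (dpinv_init a b (b - a + 1))
      obtain ⟨_, _, hget⟩ := hfin
      have hcell : ∀ (tab : Array Int), getTab a (b - a + 1) tab a = tab.getD 0 0 := by
        intro tab
        unfold getTab
        rw [if_pos (by omega)]
        norm_num
      have hthis := hget a was12
      rw [if_pos (show a - 1 < a by omega)] at hthis
      cases was12 with
      | true =>
        simp only [if_true] at hthis ⊢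
        rw [← hcell, hthis, F]
        exact funcAux_eq b _ _ a r "" true ha (le_refl _) (le_refl _)
      | false =>
        simp only [Bool.false_eq_true, if_false] at hthis ⊢
        rw [← hcell, hthis, F]
        exact funcAux_eq b _ _ a r "" false ha (le_refl _) (le_refl _)
    · -- a ≤ 0 inside Pre_: only the immediate base case a = b with was12 = true
      rcases hpre with hpre | hpre | hpre
      · omega
      · omega
      · obtain ⟨hab, hw⟩ := hpre
        subst hab hw
        rw [if_neg ha]
        rw [PySem.List.pyRange_neg_one_cons (by omega : a - 1 < a),
            PySem.List.pyRange_neg_one_eq_nil (le_refl _), List.foldl_cons, List.foldl_nil]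
        rw [stepB, if_neg (show ¬ a = 22 by omega), if_pos rfl]
        have hidx : (a - a).toNat = 0 := by omega
        rw [funcAux.eq_def]
        simp only [if_true, hidx]
        have h2 : ¬(a > a ∨ a = 22) := by omega
        simp [Array.getD]
        omega
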